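-- pv_equiv track=rewrite | github.com/simka275/Advent-of-Code | 2019/day16.py | fft
-- ===== SOURCE A (Python) =====
-- def fft(inp, offset):
--     base_pattern = [0, 1, 0, -1]
--
--     outp = fft_past_offset(inp, offset)
--     if offset >= len(inp)//2:
--         return outp
--
--     for i in range(len(inp)//2-1, offset-1, -1):
--         s = 0
--         for j in  range(len(inp)-1, i-1, -1):
--             base_pattern_index = (j+1)//(i+1)
--             base_pattern_index %= len(base_pattern)
--             s += inp[j]*base_pattern[base_pattern_index]
--         outp[i] = abs(s) % 10
--     return outp
--
-- def fft_past_offset(inp, offset):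
--     outp = inp.copy()
--     s = 0
--     llim = len(inp)//2 if offset < len(inp)//2 else offset
--     for i in range(len(inp)-1, llim-1, -1):
--         s += inp[i]
--         outp[i] = abs(s) % 10
--     return outp
--
-- inp = [int(x) for x in "03081770884921959731165446850517"*10000]
--
-- offset = int("".join(map(str, inp[:7])))
-- ===== SOURCE B (Python) =====
-- def fft(inp, offset):
--     n = len(inp)
--     pre = [0]
--     for v in inp:
--         pre.append(pre[-1] + v)
--     out = list(inp)
--     for i in range(max(n // 2, offset), n):
--         out[i] = abs(pre[n] - pre[i]) % 10
--     for i in range(offset, n // 2):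
--         L = i + 1
--         s = 0
--         start = L - 1
--         sign = 1
--         while start < n:
--             end = min(start + L, n)
--             s += sign * (pre[end] - pre[start])
--             start += 2 * L
--             sign = -sign
--         out[i] = abs(s) % 10
--     return out
-- ===== Notes on version B (the rewrite author's own statement) =====
-- stated objective: alternative
-- what changed: Replaces A's quadratic per-element pattern scan with a single prefix-sum table plus per-row alternating block-range sums (the suffix half is read off the prefix sums instead of a running backward accumulator); on inputs with offset >= len//2 both are linear and B is not measurably faster there.
import Mathlib
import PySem

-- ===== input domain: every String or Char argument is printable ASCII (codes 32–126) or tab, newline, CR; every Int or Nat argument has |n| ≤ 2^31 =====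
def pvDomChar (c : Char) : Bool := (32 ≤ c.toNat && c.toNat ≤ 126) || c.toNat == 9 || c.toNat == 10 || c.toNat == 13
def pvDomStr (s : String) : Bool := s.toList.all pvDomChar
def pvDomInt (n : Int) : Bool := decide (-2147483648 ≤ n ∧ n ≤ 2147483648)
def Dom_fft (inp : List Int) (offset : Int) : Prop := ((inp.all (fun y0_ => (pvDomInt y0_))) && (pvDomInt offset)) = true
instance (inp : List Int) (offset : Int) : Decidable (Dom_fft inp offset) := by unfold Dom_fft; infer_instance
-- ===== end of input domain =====

-- B computes the phase from one prefix-sum table with per-row alternating block-range sums,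
-- instead of A's per-element repeating-pattern scan (a different algorithm, not claimed faster).

-- ===== PORT A =====
-- helper fft_past_offset, transliterated: backward loop accumulating a running suffix sum
def fftPastOffset (inp : List Int) (offset : Int) : List Int :=
  let llim : Int := if offset < PySem.Int.floordiv (PySem.List.len inp) 2
                    then PySem.Int.floordiv (PySem.List.len inp) 2 else offset
  ((PySem.List.pyRange (PySem.List.len inp - 1) (llim - 1) (-1)).foldl
    (fun (st : Int × List Int) i =>
      let s := st.1 + PySem.List.pyGetD inp i 0
      (s, PySem.List.pySetD st.2 i (PySem.Int.mod |s| 10))) ((0 : Int), inp)).2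

-- base_pattern = [0, 1, 0, -1]
def basePattern : List Int := [0, 1, 0, -1]

def fft (inp : List Int) (offset : Int) : List Int :=
  let outp := fftPastOffset inp offset
  if offset ≥ PySem.Int.floordiv (PySem.List.len inp) 2 then outp
  else
    (PySem.List.pyRange (PySem.Int.floordiv (PySem.List.len inp) 2 - 1) (offset - 1) (-1)).foldl
      (fun outp i =>
        let s := (PySem.List.pyRange (PySem.List.len inp - 1) (i - 1) (-1)).foldl
          (fun s j =>
            s + PySem.List.pyGetD inp j 0 *
                PySem.List.pyGetD basePattern
                  (PySem.Int.mod (PySem.Int.floordiv (j + 1) (i + 1)) (PySem.List.len basePattern)) 0) 0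
        PySem.List.pySetD outp i (PySem.Int.mod |s| 10)) outp

-- ===== PORT B =====
-- the 'while start < n' loop of Source B (the '0 < L' guard only makes the recursion total;
-- Source B reaches it with L = i + 1 ≥ 1 only)
def rowSum (pre : List Int) (n L : Int) (start sign s : Int) : Int :=
  if _h : start < n ∧ 0 < L then
    rowSum pre n L (start + 2 * L) (-sign)
      (s + sign * (PySem.List.pyGetD pre (min (start + L) n) 0 - PySem.List.pyGetD pre start 0))
  else s
termination_by (n - start).toNat
decreasing_by omega

def fft_alt (inp : List Int) (offset : Int) : List Int :=
  let n : Int := PySem.List.len inp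
  let pre : List Int := inp.foldl (fun pre v => pre ++ [PySem.List.pyGetD pre (-1) 0 + v]) [0]
  let out : List Int :=
    (PySem.List.pyRange (max (PySem.Int.floordiv n 2) offset) n 1).foldl
      (fun out i =>
        PySem.List.pySetD out i
          (PySem.Int.mod |PySem.List.pyGetD pre n 0 - PySem.List.pyGetD pre i 0| 10)) inp
  (PySem.List.pyRange offset (PySem.Int.floordiv n 2) 1).foldl
    (fun out i =>
      PySem.List.pySetD out i (PySem.Int.mod |rowSum pre n (i + 1) i 1 0| 10)) out

-- ===== PRECONDITION & SPEC =====
-- Pre_ excludes negative offsets: there A's row loop reaches i = -1 and raises ZeroDivisionError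
def Pre_fft (_inp : List Int) (offset : Int) : Prop := 0 ≤ offset
instance (inp : List Int) (offset : Int) : Decidable (Pre_fft inp offset) := by unfold Pre_fft; infer_instance
def pvWitness_fft : List Int × Int := ([1, 2, 3, 4, 5, 6, 7, 8], 1)

def Spec_fft (inp : List Int) (offset : Int) (out : List Int) : Prop := out = fft_alt inp offset
instance (inp : List Int) (offset : Int) (out : List Int) : Decidable (Spec_fft inp offset out) := by unfold Spec_fft; infer_instance

-- ===== CLAIM (what is proved, stated in full; the proofs are below) =====
def Claim_equal_fft : Prop := ∀ (inp : List Int) (offset : Int), Dom_fft inp offset → Pre_fft inp offset → Spec_fft inp offset (fft inp offset)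

-- ===== LEMMAS AND PROOFS =====

-- prefix sums of inp (proof-side spec)
def pvPref (inp : List Int) (k : Nat) : Int := (inp.take k).sum

-- the pattern weight A multiplies inp[j] by, in row with L = i + 1
def pvWgt (L j : Int) : Int :=
  PySem.List.pyGetD basePattern (PySem.Int.mod (PySem.Int.floordiv (j + 1) L) 4) 0

-- the weighted tail sum both programs compute for one row
def pvWsum (inp : List Int) (L a : Int) : Int :=
  ((PySem.List.pyRange a (inp.length : Int)).map
    (fun j => PySem.List.pyGetD inp j 0 * pvWgt L j)).sum

-- running partial sums (spec of B's pre-building loop)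
def pvSums : List Int → Int → List Int
  | [], _ => []
  | v :: xs, s => (s + v) :: pvSums xs (s + v)

def pvPre (inp : List Int) : List Int :=
  inp.foldl (fun pre v => pre ++ [PySem.List.pyGetD pre (-1) 0 + v]) [0]

lemma pvSums_length (xs : List Int) (s : Int) : (pvSums xs s).length = xs.length := by
  induction xs generalizing s with
  | nil => rfl
  | cons v xs ih => simp [pvSums, ih]

lemma pvSums_getElem? (xs : List Int) (s : Int) (k : Nat) (hk : k < xs.length) :
    (pvSums xs s)[k]? = some (s + pvPref xs (k + 1)) := by
  induction xs generalizing s k with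
  | nil => simp at hk
  | cons v xs ih =>
    cases k with
    | zero => simp [pvSums, pvPref]
    | succ k =>
      simp only [pvSums, List.getElem?_cons_succ]
      rw [ih _ _ (by simpa using hk)]
      have : pvPref (v :: xs) (k + 1 + 1) = v + pvPref xs (k + 1) := by
        simp [pvPref, List.take_succ_cons]
      rw [this]
      ring_nf

lemma pvPre_foldl (xs : List Int) : ∀ (acc : List Int) (h : acc ≠ []),
    xs.foldl (fun pre v => pre ++ [PySem.List.pyGetD pre (-1) 0 + v]) acc
      = acc ++ pvSums xs (acc.getLast h) := by
  induction xs with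
  | nil => intro acc h; simp [pvSums]
  | cons v xs ih =>
    intro acc h
    simp only [List.foldl_cons]
    rw [PySem.List.pyGetD_neg_one acc 0 h]
    rw [ih (acc ++ [acc.getLast h + v]) (by simp)]
    rw [List.getLast_concat]
    simp [pvSums]

lemma pvPre_eq (inp : List Int) : pvPre inp = 0 :: pvSums inp 0 := by
  rw [pvPre, pvPre_foldl inp [0] (by simp)]
  simp

lemma pvPre_length (inp : List Int) : (pvPre inp).length = inp.length + 1 := by
  simp [pvPre_eq, pvSums_length]

lemma pvPreLookup (inp : List Int) (i : Int) (h0 : 0 ≤ i) (h1 : i ≤ (inp.length : Int)) :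
    PySem.List.pyGetD (pvPre inp) i 0 = pvPref inp i.toNat := by
  have hlen : i.toNat ≤ inp.length := by omega
  rw [PySem.List.pyGetD_eq_getElem _ _ h0 (by rw [pvPre_length]; omega)]
  rw [List.getElem_eq_iff]
  rw [pvPre_eq]
  rcases hi : i.toNat with _ | k
  · simp [pvPref]
  · have hk : k < inp.length := by omega
    simpa using pvSums_getElem? inp 0 k hk

lemma pvPref_succ (inp : List Int) (k : Nat) (h : k < inp.length) :
    pvPref inp (k + 1) = pvPref inp k + inp[k] := List.sum_take_succ inp k h

lemma pvSegSum (inp : List Int) : ∀ (d : Nat) (a b : Int), 0 ≤ a → b = a + d → b ≤ (inp.length : Int) →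
    ((PySem.List.pyRange a b).map (fun j => PySem.List.pyGetD inp j 0)).sum
      = pvPref inp b.toNat - pvPref inp a.toNat := by
  intro d
  induction d with
  | zero =>
    intro a b h0 hb hbn
    have hba : b = a := by omega
    subst hba
    simp [PySem.List.pyRange_one_eq_nil (le_refl b)]
  | succ d ih =>
    intro a b h0 hb hbn
    have h1 : b = (a + d) + 1 := by omega
    subst h1
    rw [PySem.List.pyRange_one_succ_right (by omega)]
    rw [List.map_append, List.sum_append, ih a (a + d) h0 rfl (by omega)]
    have hidx : (0 : Int) ≤ a + d := by omega
    have hlt : a + d < (inp.length : Int) := by omega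
    simp only [List.map_cons, List.map_nil, List.sum_cons, List.sum_nil, add_zero]
    rw [PySem.List.pyGetD_eq_getElem inp 0 hidx hlt]
    rw [show ((a + d) + 1).toNat = (a + d).toNat + 1 by omega]
    rw [pvPref_succ inp (a + d).toNat (by omega)]
    ring

lemma pvWgt_sign (L j : Int) (m : Nat) (hL : 0 < L)
    (hlo : L * (2 * (m : Int) + 1) ≤ j + 1) (hhi : j + 1 < L * (2 * (m : Int) + 2)) :
    pvWgt L j = (if m % 2 = 0 then (1 : Int) else -1) := by
  have hq : PySem.Int.floordiv (j + 1) L = 2 * (m : Int) + 1 := by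
    rw [PySem.Int.floordiv_eq_iff_of_pos hL]
    constructor
    · rw [mul_comm]; exact hlo
    · have h2 : (2 * (m : Int) + 1 + 1) * L = L * (2 * (m : Int) + 2) := by ring
      rw [h2]; exact hhi
  rw [pvWgt, hq, PySem.Int.mod_eq_emod_of_pos (by norm_num)]
  rcases Nat.mod_two_eq_zero_or_one m with hm | hm
  · have h4 : (2 * (m : Int) + 1) % 4 = 1 := by omega
    rw [h4, if_pos hm]; decide
  · have h4 : (2 * (m : Int) + 1) % 4 = 3 := by omega
    rw [h4, if_neg (by omega)]; decide

lemma pvWgt_zero (L j : Int) (m : Nat) (hL : 0 < L)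
    (hlo : L * (2 * (m : Int) + 2) ≤ j + 1) (hhi : j + 1 < L * (2 * (m : Int) + 3)) :
    pvWgt L j = 0 := by
  have hq : PySem.Int.floordiv (j + 1) L = 2 * (m : Int) + 2 := by
    rw [PySem.Int.floordiv_eq_iff_of_pos hL]
    constructor
    · rw [mul_comm]; exact hlo
    · have h2 : (2 * (m : Int) + 2 + 1) * L = L * (2 * (m : Int) + 3) := by ring
      rw [h2]; exact hhi
  rw [pvWgt, hq, PySem.Int.mod_eq_emod_of_pos (by norm_num)]
  rcases Nat.mod_two_eq_zero_or_one m with hm | hm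
  · have h4 : (2 * (m : Int) + 2) % 4 = 2 := by omega
    rw [h4]; decide
  · have h4 : (2 * (m : Int) + 2) % 4 = 0 := by omega
    rw [h4]; decide

lemma pvWsum_nil (inp : List Int) (L a : Int) (h : (inp.length : Int) ≤ a) : pvWsum inp L a = 0 := by
  simp [pvWsum, PySem.List.pyRange_one_eq_nil h]

lemma pvWsum_block (inp : List Int) (L : Int) (m : Nat) (hL : 0 < L)
    (start : Int) (hs : start = L * (2 * (m : Int) + 1) - 1) (hlt : start < (inp.length : Int)) :
    pvWsum inp L start
      = (if m % 2 = 0 then (1 : Int) else -1)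
          * (pvPref inp (min (start + L) (inp.length : Int)).toNat - pvPref inp start.toNat)
        + pvWsum inp L (start + 2 * L) := by
  have hmul : L * 1 ≤ L * (2 * (m : Int) + 1) := by
    apply mul_le_mul_of_nonneg_left (by omega) (by omega)
  have h0start : 0 ≤ start := by nlinarith
  have hr1 : L * (2 * (m : Int) + 2) = L * (2 * (m : Int) + 1) + L := by ring
  have hr2 : L * (2 * (m : Int) + 3) = L * (2 * (m : Int) + 1) + 2 * L := by ring
  set N : Int := (inp.length : Int) with hNdef
  set e : Int := min (start + L) N with he
  set e2 : Int := min (start + 2 * L) N with he2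
  have hse : start ≤ e := by omega
  have hee2 : e ≤ e2 := by omega
  have he2N : e2 ≤ N := by omega
  rw [pvWsum, ← hNdef]
  rw [PySem.List.pyRange_one_append start e N hse (by omega)]
  rw [PySem.List.pyRange_one_append e e2 N hee2 he2N]
  rw [List.map_append, List.map_append, List.sum_append, List.sum_append]
  have hpart1 :
      ((PySem.List.pyRange start e).map (fun j => PySem.List.pyGetD inp j 0 * pvWgt L j)).sum
        = (if m % 2 = 0 then (1 : Int) else -1) * (pvPref inp e.toNat - pvPref inp start.toNat) := by
    rw [List.map_congr_left (l := PySem.List.pyRange start e)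
      (f := fun j => PySem.List.pyGetD inp j 0 * pvWgt L j)
      (g := fun j => PySem.List.pyGetD inp j 0 * (if m % 2 = 0 then (1 : Int) else -1))
      (fun j hj => by
        rw [PySem.List.mem_pyRange_one] at hj
        simp only []
        rw [pvWgt_sign L j m hL (by omega) (by omega)])]
    rw [List.sum_map_mul_right]
    rw [pvSegSum inp (e - start).toNat start e h0start (by omega) (by omega)]
    ring
  have hpart2 :
      ((PySem.List.pyRange e e2).map (fun j => PySem.List.pyGetD inp j 0 * pvWgt L j)).sum = 0 := by
    by_cases hc : start + L ≤ N
    · apply List.sum_eq_zero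
      intro x hx
      simp only [List.mem_map] at hx
      obtain ⟨j, hj, rfl⟩ := hx
      rw [PySem.List.mem_pyRange_one] at hj
      rw [pvWgt_zero L j m hL (by omega) (by omega)]
      ring
    · have hee : e = N := by omega
      have hee2' : e2 = N := by omega
      rw [hee, hee2', PySem.List.pyRange_one_eq_nil (le_refl N)]
      simp
  have hpart3 :
      ((PySem.List.pyRange e2 N).map (fun j => PySem.List.pyGetD inp j 0 * pvWgt L j)).sum
        = pvWsum inp L (start + 2 * L) := by
    by_cases hc : start + 2 * L ≤ N
    · have : e2 = start + 2 * L := by omega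
      rw [this, pvWsum, ← hNdef]
    · have : e2 = N := by omega
      rw [this, PySem.List.pyRange_one_eq_nil (le_refl N), pvWsum_nil inp L _ (by omega)]
      simp
  rw [hpart1, hpart2, hpart3]
  ring

lemma pvRowSum_spec (inp : List Int) : ∀ (fuel : Nat) (L start s : Int) (m : Nat), 0 < L →
    start = L * (2 * (m : Int) + 1) - 1 → ((inp.length : Int) - start).toNat ≤ fuel →
    rowSum (pvPre inp) (inp.length : Int) L start (if m % 2 = 0 then (1 : Int) else -1) s
      = s + pvWsum inp L start := by
  intro fuel
  induction fuel with
  | zero =>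
    intro L start s m hL hs hf
    rw [rowSum, dif_neg (by omega)]
    rw [pvWsum_nil inp L start (by omega), add_zero]
  | succ fuel ih =>
    intro L start s m hL hs hf
    by_cases hlt : start < (inp.length : Int)
    · rw [rowSum, dif_pos ⟨hlt, hL⟩]
      have hmul : L * 1 ≤ L * (2 * (m : Int) + 1) := by
        apply mul_le_mul_of_nonneg_left (by omega) (by omega)
      have h0start : 0 ≤ start := by nlinarith
      have hsgn : -(if m % 2 = 0 then (1 : Int) else -1)
          = (if (m + 1) % 2 = 0 then (1 : Int) else -1) := by
        rcases Nat.mod_two_eq_zero_or_one m with hm | hm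
        · rw [if_pos hm, if_neg (by omega)]
        · rw [if_neg (by omega), if_pos (by omega)]; norm_num
      rw [hsgn]
      rw [ih L (start + 2 * L) _ (m + 1) hL (by rw [hs]; push_cast; ring) (by omega)]
      rw [pvPreLookup inp (min (start + L) (inp.length : Int)) (by omega) (by omega)]
      rw [pvPreLookup inp start h0start (by omega)]
      rw [pvWsum_block inp L m hL start hs hlt]
      ring
    · rw [rowSum, dif_neg (by omega)]
      rw [pvWsum_nil inp L start (by omega), add_zero]

lemma pvInnerSum (inp : List Int) (i : Int) :
    (PySem.List.pyRange ((inp.length : Int) - 1) (i - 1) (-1)).foldl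
      (fun s j =>
        s + PySem.List.pyGetD inp j 0 *
            PySem.List.pyGetD basePattern
              (PySem.Int.mod (PySem.Int.floordiv (j + 1) (i + 1)) ((basePattern.length : Int))) 0) 0
      = pvWsum inp (i + 1) i := by
  rw [PySem.List.foldl_add]
  rw [PySem.List.pyRange_neg_one_eq_reverse]
  rw [show (i - 1) + 1 = i by ring, show ((inp.length : Int) - 1) + 1 = (inp.length : Int) by ring]
  rw [List.map_reverse, List.sum_reverse, zero_add]
  rw [pvWsum]
  rfl

lemma pvFoldlSetLength (l : List Int) (f : Int → Int) :
    ∀ (out : List Int), (l.foldl (fun out i => PySem.List.pySetD out i (f i)) out).length = out.length := by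
  induction l with
  | nil => intro out; rfl
  | cons x l ih => intro out; simp only [List.foldl_cons, ih, PySem.List.length_pySetD]

lemma pvFoldlSetAsc (f : Int → Int) : ∀ (d : Nat) (a b : Int) (out : List Int),
    b = a + d → 0 ≤ a → b ≤ (out.length : Int) → ∀ k : Nat,
    ((PySem.List.pyRange a b).foldl (fun out i => PySem.List.pySetD out i (f i)) out)[k]?
      = if a ≤ (k : Int) ∧ (k : Int) < b then some (f k) else out[k]? := by
  intro d
  induction d with
  | zero =>
    intro a b out hb h0 hbl k
    rw [PySem.List.pyRange_one_eq_nil (by omega), List.foldl_nil, if_neg (by omega)]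
  | succ d ih =>
    intro a b out hb h0 hbl k
    have hab : a < b := by omega
    rw [PySem.List.pyRange_one_cons hab, List.foldl_cons, PySem.List.pySetD_of_nonneg _ _ h0]
    rw [ih (a + 1) b (out.set a.toNat (f a)) (by omega) (by omega)
      (by rw [List.length_set]; omega) k]
    by_cases hk : a + 1 ≤ (k : Int) ∧ (k : Int) < b
    · rw [if_pos hk, if_pos (by omega)]
    · rw [if_neg hk]
      by_cases hka : (k : Int) = a
      · rw [if_pos (by omega)]
        have hkn : a.toNat = k := by omega
        rw [← hkn, List.getElem?_set_self (by omega)]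
        congr 2
        omega
      · rw [if_neg (by omega), List.getElem?_set_ne (by omega)]

lemma pvFoldlSetDesc (f : Int → Int) : ∀ (d : Nat) (a b : Int) (out : List Int),
    a = b + d → -1 ≤ b → a < (out.length : Int) → ∀ k : Nat,
    ((PySem.List.pyRange a b (-1)).foldl (fun out i => PySem.List.pySetD out i (f i)) out)[k]?
      = if b < (k : Int) ∧ (k : Int) ≤ a then some (f k) else out[k]? := by
  intro d
  induction d with
  | zero =>
    intro a b out hb h0 hbl k
    rw [PySem.List.pyRange_neg_one_eq_nil (by omega), List.foldl_nil, if_neg (by omega)]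
  | succ d ih =>
    intro a b out hb h0 hbl k
    have hab : b < a := by omega
    have ha0 : 0 ≤ a := by omega
    rw [PySem.List.pyRange_neg_one_cons hab, List.foldl_cons, PySem.List.pySetD_of_nonneg _ _ ha0]
    rw [ih (a - 1) b (out.set a.toNat (f a)) (by omega) (by omega)
      (by rw [List.length_set]; omega) k]
    by_cases hk : b < (k : Int) ∧ (k : Int) ≤ a - 1
    · rw [if_pos hk, if_pos (by omega)]
    · rw [if_neg hk]
      by_cases hka : (k : Int) = a
      · rw [if_pos (by omega)]
        have hkn : a.toNat = k := by omega
        rw [← hkn, List.getElem?_set_self (by omega)]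
        congr 2
        omega
      · rw [if_neg (by omega), List.getElem?_set_ne (by omega)]

lemma pvSuffixLoop (inp : List Int) : ∀ (d : Nat) (a b s : Int) (out : List Int),
    out.length = inp.length → a = b + d → -1 ≤ b → a < (inp.length : Int) →
    (((PySem.List.pyRange a b (-1)).foldl
        (fun (st : Int × List Int) i =>
          let s := st.1 + PySem.List.pyGetD inp i 0
          (s, PySem.List.pySetD st.2 i (PySem.Int.mod |s| 10))) (s, out)).2.length = out.length)
    ∧ ∀ k : Nat,
      ((PySem.List.pyRange a b (-1)).foldl
        (fun (st : Int × List Int) i =>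
          let s := st.1 + PySem.List.pyGetD inp i 0
          (s, PySem.List.pySetD st.2 i (PySem.Int.mod |s| 10))) (s, out)).2[k]?
        = if b < (k : Int) ∧ (k : Int) ≤ a
          then some (PySem.Int.mod |s + (pvPref inp (a + 1).toNat - pvPref inp k)| 10)
          else out[k]? := by
  intro d
  induction d with
  | zero =>
    intro a b s out hlen hb h0 haN
    rw [PySem.List.pyRange_neg_one_eq_nil (by omega)]
    exact ⟨rfl, fun k => by rw [List.foldl_nil, if_neg (by omega)]⟩
  | succ d ih =>
    intro a b s out hlen hb h0 haN
    have hab : b < a := by omega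
    have ha0 : 0 ≤ a := by omega
    have haU : a.toNat < inp.length := by omega
    rw [PySem.List.pyRange_neg_one_cons hab, List.foldl_cons]
    dsimp only
    rw [PySem.List.pySetD_of_nonneg _ _ ha0]
    have hget : PySem.List.pyGetD inp a 0 = inp[a.toNat] :=
      PySem.List.pyGetD_eq_getElem inp 0 ha0 (by omega)
    obtain ⟨ihlen, ihget⟩ := ih (a - 1) b (s + PySem.List.pyGetD inp a 0)
      (out.set a.toNat (PySem.Int.mod |s + PySem.List.pyGetD inp a 0| 10))
      (by rw [List.length_set]; exact hlen) (by omega) (by omega) (by omega)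
    refine ⟨by rw [ihlen, List.length_set], fun k => ?_⟩
    rw [ihget k]
    have hpsucc : pvPref inp (a.toNat + 1) = pvPref inp a.toNat + inp[a.toNat] :=
      pvPref_succ inp a.toNat haU
    by_cases hk : b < (k : Int) ∧ (k : Int) ≤ a - 1
    · rw [if_pos hk, if_pos (by omega)]
      congr 2
      rw [hget]
      rw [show ((a - 1) + 1).toNat = a.toNat by omega, show (a + 1).toNat = a.toNat + 1 by omega]
      rw [hpsucc]
      congr 1
      omega
    · rw [if_neg hk]
      by_cases hka : (k : Int) = a
      · rw [if_pos (by omega)]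
        have hkn : a.toNat = k := by omega
        rw [← hkn, List.getElem?_set_self (by omega)]
        congr 2
        rw [hget, show (a + 1).toNat = a.toNat + 1 by omega, hpsucc]
        congr 1
        omega
      · rw [if_neg (by omega), List.getElem?_set_ne (by omega)]

lemma pvFoldlSetAsc' (f : Int → Int) (a b : Int) (out : List Int)
    (h0 : 0 ≤ a) (hbl : b ≤ (out.length : Int)) (k : Nat) :
    ((PySem.List.pyRange a b).foldl (fun out i => PySem.List.pySetD out i (f i)) out)[k]?
      = if a ≤ (k : Int) ∧ (k : Int) < b then some (f k) else out[k]? := by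
  by_cases hab : b ≤ a
  · rw [PySem.List.pyRange_one_eq_nil hab, List.foldl_nil, if_neg (by omega)]
  · exact pvFoldlSetAsc f (b - a).toNat a b out (by omega) h0 hbl k

lemma pvRowSum_row (inp : List Int) (i : Int) (h0 : 0 ≤ i) :
    rowSum (pvPre inp) (inp.length : Int) (i + 1) i 1 0 = pvWsum inp (i + 1) i := by
  have h := pvRowSum_spec inp inp.length (i + 1) i 0 0 (by omega) (by push_cast; ring) (by omega)
  simpa using h

lemma fftPastOffset_spec (inp : List Int) (offset : Int) (hoff : 0 ≤ offset) :
    (fftPastOffset inp offset).length = inp.length ∧ ∀ k : Nat,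
      (fftPastOffset inp offset)[k]?
        = if max (PySem.Int.floordiv (inp.length : Int) 2) offset ≤ (k : Int)
              ∧ (k : Int) < (inp.length : Int)
          then some (PySem.Int.mod |pvPref inp inp.length - pvPref inp k| 10)
          else inp[k]? := by
  have hN2 := PySem.Int.floordiv_mul_add_mod (inp.length : Int) 2
  have hm0 := PySem.Int.mod_nonneg (inp.length : Int) (by norm_num : (0 : Int) < 2)
  have hm1 := PySem.Int.mod_lt (inp.length : Int) (by norm_num : (0 : Int) < 2)
  simp only [fftPastOffset, PySem.List.len_eq]
  have hllim : (if offset < PySem.Int.floordiv ((inp.length : Int)) 2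
        then PySem.Int.floordiv ((inp.length : Int)) 2 else offset)
      = max (PySem.Int.floordiv ((inp.length : Int)) 2) offset := by
    split_ifs with h <;> omega
  rw [hllim]
  set llim := max (PySem.Int.floordiv ((inp.length : Int)) 2) offset with hl
  have hllim0 : 0 ≤ llim := by omega
  by_cases hle : llim ≤ (inp.length : Int)
  · obtain ⟨h1, h2⟩ := pvSuffixLoop inp ((inp.length : Int) - llim).toNat
      ((inp.length : Int) - 1) (llim - 1) 0 inp rfl (by omega) (by omega) (by omega)
    refine ⟨h1, fun k => ?_⟩
    rw [h2 k]
    by_cases hk : llim ≤ (k : Int) ∧ (k : Int) < (inp.length : Int)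
    · rw [if_pos (by omega), if_pos hk]
      rw [zero_add, show ((inp.length : Int) - 1 + 1).toNat = inp.length by omega]
    · rw [if_neg (by omega), if_neg hk]
  · rw [PySem.List.pyRange_neg_one_eq_nil (by omega), List.foldl_nil]
    exact ⟨rfl, fun k => by rw [if_neg (by omega)]⟩

-- ===== VERDICT (by name: the statement is the Claim_ definition above) =====
theorem fft_spec : Claim_equal_fft := by
  intro inp offset _hdom hpre
  have hoff : 0 ≤ offset := hpre
  unfold Spec_fft
  have hN2 := PySem.Int.floordiv_mul_add_mod (inp.length : Int) 2
  have hm0 := PySem.Int.mod_nonneg (inp.length : Int) (by norm_num : (0 : Int) < 2)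
  have hm1 := PySem.Int.mod_lt (inp.length : Int) (by norm_num : (0 : Int) < 2)
  obtain ⟨hPOlen, hPOget⟩ := fftPastOffset_spec inp offset hoff
  simp only [fft, fft_alt, PySem.List.len_eq, ge_iff_le]
  rw [show List.foldl (fun pre v => pre ++ [PySem.List.pyGetD pre (-1) 0 + v]) [0] inp
      = pvPre inp from rfl]
  have hpreN : PySem.List.pyGetD (pvPre inp) ((inp.length : Int)) 0 = pvPref inp inp.length := by
    rw [pvPreLookup inp _ (by omega) (by omega), Int.toNat_natCast]
  by_cases hcase : PySem.Int.floordiv ((inp.length : Int)) 2 ≤ offset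
  · rw [if_pos hcase]
    rw [PySem.List.pyRange_one_eq_nil hcase, List.foldl_nil]
    rw [max_eq_right hcase] at hPOget ⊢
    apply List.ext_getElem?
    intro k
    rw [hPOget k]
    rw [pvFoldlSetAsc' _ offset ((inp.length : Int)) inp hoff (by omega) k]
    by_cases hk : offset ≤ (k : Int) ∧ (k : Int) < (inp.length : Int)
    · rw [if_pos hk, if_pos hk]
      rw [hpreN, pvPreLookup inp ((k : Int)) (by omega) (by omega), Int.toNat_natCast]
    · rw [if_neg hk, if_neg hk]
  · rw [if_neg hcase]
    have hfd0 : 0 ≤ PySem.Int.floordiv ((inp.length : Int)) 2 := by omega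
    rw [max_eq_left (by omega)] at hPOget
    apply List.ext_getElem?
    intro k
    rw [pvFoldlSetDesc _ (PySem.Int.floordiv ((inp.length : Int)) 2 - offset).toNat
      (PySem.Int.floordiv ((inp.length : Int)) 2 - 1) (offset - 1) _ (by omega) (by omega)
      (by rw [hPOlen]; omega) k]
    rw [pvFoldlSetAsc' _ offset (PySem.Int.floordiv ((inp.length : Int)) 2) _ hoff
      (by rw [pvFoldlSetLength]; omega) k]
    by_cases hk : offset ≤ (k : Int) ∧ (k : Int) < PySem.Int.floordiv ((inp.length : Int)) 2
    · rw [if_pos (by omega), if_pos hk]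
      rw [pvInnerSum inp ((k : Int))]
      rw [pvRowSum_row inp ((k : Int)) (by omega)]
    · rw [if_neg (by omega), if_neg hk]
      rw [hPOget k]
      rw [pvFoldlSetAsc' _ (max (PySem.Int.floordiv ((inp.length : Int)) 2) offset)
        ((inp.length : Int)) inp (by omega) (by omega) k]
      rw [max_eq_left (by omega)]
      by_cases hk2 : PySem.Int.floordiv ((inp.length : Int)) 2 ≤ (k : Int)
          ∧ (k : Int) < (inp.length : Int)
      · rw [if_pos hk2, if_pos hk2]
        rw [hpreN, pvPreLookup inp ((k : Int)) (by omega) (by omega), Int.toNat_natCast]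
      · rw [if_neg hk2, if_neg hk2]
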